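-- pv_equiv track=rewrite | github.com/MrBrantCode/unitest_baseline | mut_generate/mist_train_cf/cf_45502/solution.py | entrance
-- ===== SOURCE A (Python) =====
-- def entrance(slots1, slots2, duration):
--     slots1.sort()
--     slots2.sort()
--     i = j = 0
--     while i < len(slots1) and j < len(slots2):
--         intersect = min(slots1[i][1], slots2[j][1]) - max(slots1[i][0], slots2[j][0])
--         if intersect >= duration:
--             return [max(slots1[i][0], slots2[j][0]), max(slots1[i][0], slots2[j][0]) + duration]
--         if slots1[i][1] < slots2[j][1]:
--             i += 1
--         else:
--             j += 1
--     return []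
-- ===== SOURCE B (Python) =====
-- def entrance(slots1, slots2, duration):
--     slots1.sort()
--     slots2.sort()
--     best = None
--     for a in slots1:
--         for b in slots2:
--             start = max(a[0], b[0])
--             end = min(a[1], b[1])
--             if end - start >= duration and (best is None or start < best):
--                 best = start
--     return [] if best is None else [best, best + duration]
-- ===== Notes on version B (the rewrite author's own statement) =====
-- stated objective: simpler
-- what changed: Replaces the two-pointer merge sweep (advance the pointer whose slot ends first, return at the first sufficient intersection) by an exhaustive double loop over all slot pairs that keeps the minimal common start of sufficient duration; both sort the arguments in place. Pre_ excludes inputs containing an interval with fewer than two endpoints while the other schedule is nonempty: A raises IndexError on them unless its sweep happens to return before reaching the malformed slot, and B's exhaustive scan raises there.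
-- outside the precondition, e.g. on entrance([[0, 10], [5]], [[0, 10]], 1): A returns [0, 1], B raises IndexError
import Mathlib
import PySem

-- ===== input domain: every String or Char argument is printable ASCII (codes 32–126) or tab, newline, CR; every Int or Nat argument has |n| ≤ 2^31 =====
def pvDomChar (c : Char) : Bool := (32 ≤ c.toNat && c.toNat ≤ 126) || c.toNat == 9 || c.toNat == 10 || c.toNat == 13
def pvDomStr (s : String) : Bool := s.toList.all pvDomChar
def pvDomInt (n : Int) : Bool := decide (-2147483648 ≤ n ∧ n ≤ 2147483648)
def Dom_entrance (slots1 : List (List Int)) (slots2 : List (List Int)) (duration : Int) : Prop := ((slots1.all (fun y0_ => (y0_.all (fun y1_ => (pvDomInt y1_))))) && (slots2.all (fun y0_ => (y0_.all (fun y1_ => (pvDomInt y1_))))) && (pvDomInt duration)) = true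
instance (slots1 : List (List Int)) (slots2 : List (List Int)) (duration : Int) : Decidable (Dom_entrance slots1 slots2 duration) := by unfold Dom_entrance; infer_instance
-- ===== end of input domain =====

-- B replaces A's two-pointer sweep by an exhaustive pairwise scan keeping the minimal common
-- start (objective: simpler).  Both Pythons sort their list arguments IN PLACE (the same
-- mutation); the equivalence proved here is about the return value.

-- ===== PORT A =====
-- shared accessor: l[i] (total form of Python indexing, used only under Pre_, where it is in range)
def pvAt (l : List Int) (i : Int) : Int := PySem.List.pyGetD l i 0

-- shared: slots.sort() — Python sorts lists of int-lists lexicographically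
def pvSort (xs : List (List Int)) : List (List Int) := PySem.List.sorted xs (fun x => x) false

-- the while loop: i/j advances become structural descent on the two (sorted) suffixes
def pvSweep (d : Int) : List (List Int) → List (List Int) → List Int
  | [], _ => []
  | _ :: _, [] => []
  | x :: xs, y :: ys =>
    if min (pvAt x 1) (pvAt y 1) - max (pvAt x 0) (pvAt y 0) ≥ d then
      [max (pvAt x 0) (pvAt y 0), max (pvAt x 0) (pvAt y 0) + d]
    else if pvAt x 1 < pvAt y 1 then pvSweep d xs (y :: ys)
    else pvSweep d (x :: xs) ys
  termination_by a b => a.length + b.length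

def entrance (slots1 : List (List Int)) (slots2 : List (List Int)) (duration : Int) : List Int :=
  pvSweep duration (pvSort slots1) (pvSort slots2)

-- ===== PORT B =====
-- inner-loop body: update best with start = max(a[0],b[0]) when the overlap suffices
def pvStep (d : Int) (a : List Int) (acc : Option Int) (b : List Int) : Option Int :=
  if min (pvAt a 1) (pvAt b 1) - max (pvAt a 0) (pvAt b 0) ≥ d then
    match acc with
    | none => some (max (pvAt a 0) (pvAt b 0))
    | some v => if max (pvAt a 0) (pvAt b 0) < v then some (max (pvAt a 0) (pvAt b 0)) else some v
  else acc

def entrance_alt (slots1 : List (List Int)) (slots2 : List (List Int)) (duration : Int) : List Int :=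
  let s1 := pvSort slots1
  let s2 := pvSort slots2
  let best := s1.foldl (fun acc a => s2.foldl (pvStep duration a) acc) none
  match best with
  | none => []
  | some s => [s, s + duration]

-- ===== PRECONDITION & SPEC =====
-- Pre_ excludes inputs containing an interval with fewer than two endpoints while the other
-- schedule is nonempty: A raises IndexError on them unless its sweep happens to return before
-- reaching the malformed slot, and B's exhaustive scan raises there.
def Pre_entrance (slots1 : List (List Int)) (slots2 : List (List Int)) (duration : Int) : Prop :=
  (slots2 ≠ [] → ∀ l ∈ slots1, 2 ≤ l.length) ∧ (slots1 ≠ [] → ∀ l ∈ slots2, 2 ≤ l.length)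
instance (slots1 : List (List Int)) (slots2 : List (List Int)) (duration : Int) : Decidable (Pre_entrance slots1 slots2 duration) := by unfold Pre_entrance; infer_instance

def pvWitness_entrance : List (List Int) × List (List Int) × Int := ([[0, 5], [7, 9]], [[1, 6]], 2)

def Spec_entrance (slots1 : List (List Int)) (slots2 : List (List Int)) (duration : Int) (out : List Int) : Prop := out = entrance_alt slots1 slots2 duration
instance (slots1 : List (List Int)) (slots2 : List (List Int)) (duration : Int) (out : List Int) : Decidable (Spec_entrance slots1 slots2 duration out) := by unfold Spec_entrance; infer_instance

-- ===== CLAIM (what is proved, stated in full; the proofs are below) =====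
def Claim_equal_entrance : Prop := ∀ (slots1 : List (List Int)) (slots2 : List (List Int)) (duration : Int), Dom_entrance slots1 slots2 duration → Pre_entrance slots1 slots2 duration → Spec_entrance slots1 slots2 duration (entrance slots1 slots2 duration)

-- ===== LEMMAS AND PROOFS =====

-- A's while loop exits at once when the second list is empty
lemma pvSweep_nil_right (d : Int) (xs : List (List Int)) : pvSweep d xs [] = [] := by
  cases xs with
  | nil => simp [pvSweep]
  | cons x xs => simp [pvSweep]

-- the list of common starts of all pairs whose overlap is at least d (row-major, as B scans)
def pvRow (d : Int) (a : List Int) (ys : List (List Int)) : List Int :=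
  ys.filterMap (fun b => if min (pvAt a 1) (pvAt b 1) - max (pvAt a 0) (pvAt b 0) ≥ d then some (max (pvAt a 0) (pvAt b 0)) else none)

def pvStarts (d : Int) (xs ys : List (List Int)) : List Int :=
  xs.flatMap (fun a => pvRow d a ys)

-- one row step: pvRow on a cons
lemma pvRow_cons_pos (d : Int) (a y : List Int) (ys : List (List Int))
    (h : min (pvAt a 1) (pvAt y 1) - max (pvAt a 0) (pvAt y 0) ≥ d) :
    pvRow d a (y :: ys) = max (pvAt a 0) (pvAt y 0) :: pvRow d a ys := by
  unfold pvRow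
  rw [List.filterMap_cons, if_pos h]

lemma pvRow_cons_neg (d : Int) (a y : List Int) (ys : List (List Int))
    (h : ¬ min (pvAt a 1) (pvAt y 1) - max (pvAt a 0) (pvAt y 0) ≥ d) :
    pvRow d a (y :: ys) = pvRow d a ys := by
  unfold pvRow
  rw [List.filterMap_cons, if_neg h]

-- B's inner fold is a running minimum over the row of candidate starts
lemma pvStep_eq_fold (d : Int) (a : List Int) (ys : List (List Int)) (acc : Option Int) :
    ys.foldl (pvStep d a) acc
      = (pvRow d a ys).foldl (fun acc s => some (match acc with | none => s | some v => min v s)) acc := by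
  induction ys generalizing acc with
  | nil => rfl
  | cons y ys ih =>
    by_cases h : min (pvAt a 1) (pvAt y 1) - max (pvAt a 0) (pvAt y 0) ≥ d
    · have hstep : pvStep d a acc y
          = some (match acc with | none => max (pvAt a 0) (pvAt y 0) | some v => min v (max (pvAt a 0) (pvAt y 0))) := by
        unfold pvStep
        rw [if_pos h]
        cases acc with
        | none => rfl
        | some v =>
          show (if max (pvAt a 0) (pvAt y 0) < v then some (max (pvAt a 0) (pvAt y 0)) else some v)
              = some (min v (max (pvAt a 0) (pvAt y 0)))
          by_cases hlt : max (pvAt a 0) (pvAt y 0) < v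
          · rw [if_pos hlt]
            exact congrArg some (min_eq_right (le_of_lt hlt)).symm
          · rw [if_neg hlt]
            exact congrArg some (min_eq_left (by omega)).symm
      rw [pvRow_cons_pos d a y ys h, List.foldl_cons, List.foldl_cons, ih, hstep]
    · have hstep : pvStep d a acc y = acc := by
        unfold pvStep
        rw [if_neg h]
      rw [pvRow_cons_neg d a y ys h, List.foldl_cons, ih, hstep]

lemma pvMinFold_some (v : Int) (L : List Int) :
    L.foldl (fun acc s => some (match acc with | none => s | some v => min v s)) (some v)
      = some (L.foldl min v) := by
  induction L generalizing v with
  | nil => rfl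
  | cons s L ih => simp only [List.foldl_cons]; exact ih (min v s)

lemma pvMinFold_none (L : List Int) :
    L.foldl (fun acc s => some (match acc with | none => s | some v => min v s)) none = L.min? := by
  cases L with
  | nil => rfl
  | cons x L => simp only [List.foldl_cons, List.min?_cons']; exact pvMinFold_some x L

-- B's nested fold computes the minimum of all candidate starts
lemma pvBest_eq_min (d : Int) (xs ys : List (List Int)) :
    xs.foldl (fun acc a => ys.foldl (pvStep d a) acc) none = (pvStarts d xs ys).min? := by
  have h : xs.foldl (fun acc a => ys.foldl (pvStep d a) acc) none
      = (pvStarts d xs ys).foldl (fun acc s => some (match acc with | none => s | some v => min v s)) none := by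
    unfold pvStarts
    rw [List.foldl_flatMap]
    exact PySem.List.foldl_congr_mem (l := xs) (init := none) (h := fun acc a _ => pvStep_eq_fold d a ys acc)
  rw [h, pvMinFold_none]

lemma mem_pvStarts (d : Int) (xs ys : List (List Int)) (s : Int) :
    s ∈ pvStarts d xs ys ↔ ∃ a ∈ xs, ∃ b ∈ ys,
      min (pvAt a 1) (pvAt b 1) - max (pvAt a 0) (pvAt b 0) ≥ d ∧ s = max (pvAt a 0) (pvAt b 0) := by
  simp only [pvStarts, pvRow, List.mem_flatMap, List.mem_filterMap]
  constructor
  · rintro ⟨a, ha, b, hb, hs⟩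
    split at hs
    · exact ⟨a, ha, b, hb, by assumption, (Option.some_inj.mp hs).symm⟩
    · exact absurd hs (by simp)
  · rintro ⟨a, ha, b, hb, hv, hs⟩
    exact ⟨a, ha, b, hb, by rw [if_pos hv, hs]⟩

-- head monotonicity along Python's lexicographic order, for nonempty int-lists
lemma pvAt_zero_mono (a b : List Int) (h : a ≤ b) (ha : a ≠ []) (hb : b ≠ []) :
    pvAt a 0 ≤ pvAt b 0 := by
  cases a with
  | nil => exact absurd rfl ha
  | cons p as =>
    cases b with
    | nil => exact absurd rfl hb
    | cons q bs =>
      have h0 : pvAt (p :: as) 0 = p := by simp [pvAt]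
      have h1 : pvAt (q :: bs) 0 = q := by simp [pvAt]
      rw [h0, h1]
      rcases le_iff_lt_or_eq.mp h with h2 | h2
      · have h3 : (p :: as : List Int) < q :: bs := h2
        rcases List.cons_lt_cons_iff.mp h3 with h4 | h4
        · exact le_of_lt h4
        · exact le_of_eq h4.1
      · cases h2; exact le_rfl

-- the core equivalence: on lists with nondecreasing starts, the two-pointer sweep returns
-- the minimal sufficient common start (rendered as A renders it)
lemma pvSweep_eq_min (d : Int) (xs ys : List (List Int))
    (hx : xs.Pairwise (fun a b => pvAt a 0 ≤ pvAt b 0))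
    (hy : ys.Pairwise (fun a b => pvAt a 0 ≤ pvAt b 0)) :
    pvSweep d xs ys = (match (pvStarts d xs ys).min? with
      | none => []
      | some s => [s, s + d]) := by
  induction xs, ys using pvSweep.induct d with
  | case1 ys => simp [pvSweep, pvStarts]
  | case2 x xs =>
    have h0 : pvStarts d (x :: xs) [] = [] :=
      List.flatMap_eq_nil_iff.mpr (fun a _ => rfl)
    simp [pvSweep, h0]
  | case3 x xs y ys hvalid =>
    rw [pvSweep, if_pos hvalid]
    have hmem : max (pvAt x 0) (pvAt y 0) ∈ pvStarts d (x :: xs) (y :: ys) := by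
      rw [mem_pvStarts]
      exact ⟨x, List.mem_cons_self, y, List.mem_cons_self, hvalid, rfl⟩
    have hlb : ∀ t ∈ pvStarts d (x :: xs) (y :: ys), max (pvAt x 0) (pvAt y 0) ≤ t := by
      intro t ht
      rw [mem_pvStarts] at ht
      obtain ⟨a, ha, b, hb, -, hs⟩ := ht
      have hax : pvAt x 0 ≤ pvAt a 0 := by
        rcases List.mem_cons.mp ha with rfl | ha
        · exact le_rfl
        · exact (List.pairwise_cons.mp hx).1 a ha
      have hby : pvAt y 0 ≤ pvAt b 0 := by
        rcases List.mem_cons.mp hb with rfl | hb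
        · exact le_rfl
        · exact (List.pairwise_cons.mp hy).1 b hb
      subst hs
      exact max_le_max hax hby
    have : (pvStarts d (x :: xs) (y :: ys)).min? = some (max (pvAt x 0) (pvAt y 0)) := by
      rw [List.min?_eq_some_iff]
      exact ⟨hmem, hlb⟩
    rw [this]
  | case4 x xs y ys hvalid hend ih =>
    rw [pvSweep, if_neg hvalid, if_pos hend]
    have hrow : pvRow d x (y :: ys) = [] := by
      unfold pvRow
      rw [List.filterMap_eq_nil_iff]
      intro b hb
      have hby : pvAt y 0 ≤ pvAt b 0 := by
        rcases List.mem_cons.mp hb with rfl | hb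
        · exact le_rfl
        · exact (List.pairwise_cons.mp hy).1 b hb
      rw [if_neg]
      intro hv
      apply hvalid
      have h1 : min (pvAt x 1) (pvAt b 1) ≤ pvAt x 1 := min_le_left _ _
      have h2 : max (pvAt x 0) (pvAt y 0) ≤ max (pvAt x 0) (pvAt b 0) := max_le_max le_rfl hby
      have h3 : min (pvAt x 1) (pvAt y 1) = pvAt x 1 := min_eq_left (le_of_lt hend)
      omega
    have hstarts : pvStarts d (x :: xs) (y :: ys) = pvStarts d xs (y :: ys) := by
      unfold pvStarts
      rw [List.flatMap_cons, hrow, List.nil_append]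
    rw [hstarts]
    exact ih (List.pairwise_cons.mp hx).2 hy
  | case5 x xs y ys hvalid hend ih =>
    rw [pvSweep, if_neg hvalid, if_neg hend]
    have hcol : ∀ a ∈ x :: xs, pvRow d a (y :: ys) = pvRow d a ys := by
      intro a ha
      have hax : pvAt x 0 ≤ pvAt a 0 := by
        rcases List.mem_cons.mp ha with rfl | ha
        · exact le_rfl
        · exact (List.pairwise_cons.mp hx).1 a ha
      unfold pvRow
      rw [List.filterMap_cons, if_neg]
      intro hv
      apply hvalid
      have h1 : min (pvAt a 1) (pvAt y 1) ≤ pvAt y 1 := min_le_right _ _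
      have h2 : max (pvAt x 0) (pvAt y 0) ≤ max (pvAt a 0) (pvAt y 0) := max_le_max hax le_rfl
      have h3 : min (pvAt x 1) (pvAt y 1) = pvAt y 1 := min_eq_right (by omega)
      omega
    have hstarts : pvStarts d (x :: xs) (y :: ys) = pvStarts d (x :: xs) ys := by
      unfold pvStarts
      exact List.flatMap_congr hcol
    rw [hstarts]
    exact ih hx (List.pairwise_cons.mp hy).2

-- sortedness of pvSort in the Python (lexicographic) order
lemma pvSort_pairwise (xs : List (List Int)) :
    (pvSort xs).Pairwise (fun a b => a ≤ b) := by
  have h := PySem.List.sorted_pairwise (κ := List Int) xs (fun x => x)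
  unfold pvSort
  convert h using 2

lemma pvSort_pairwise_at (xs : List (List Int)) (hlen : ∀ l ∈ xs, 2 ≤ l.length) :
    (pvSort xs).Pairwise (fun a b => pvAt a 0 ≤ pvAt b 0) := by
  have hmem : ∀ l ∈ pvSort xs, l ≠ [] := by
    intro l hl
    have : l ∈ xs := by
      have hms := PySem.List.mem_sorted (xs := xs) (key := fun x => x) (rev := false) (x := l)
      apply hms.mp
      unfold pvSort at hl
      convert hl using 2
    have := hlen l this
    intro h; subst h; simp at this
  refine List.Pairwise.imp_of_mem ?_ (pvSort_pairwise xs)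
  intro a b ha hb hab
  exact pvAt_zero_mono a b hab (hmem a ha) (hmem b hb)

-- ===== VERDICT (by name: the statement is the Claim_ definition above) =====
theorem entrance_spec : Claim_equal_entrance := by
  intro slots1 slots2 duration _ hpre
  rcases eq_or_ne slots1 [] with rfl | h1
  · show entrance [] slots2 duration = entrance_alt [] slots2 duration
    unfold entrance entrance_alt
    have hs : pvSort ([] : List (List Int)) = [] := rfl
    rw [hs]
    simp [pvSweep]
  rcases eq_or_ne slots2 [] with rfl | h2
  · show entrance slots1 [] duration = entrance_alt slots1 [] duration
    unfold entrance entrance_alt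
    show pvSweep duration (pvSort slots1) (pvSort [])
        = (match (pvSort slots1).foldl (fun acc a => (pvSort []).foldl (pvStep duration a) acc) none with
          | none => []
          | some s => [s, s + duration])
    have hs : pvSort ([] : List (List Int)) = [] := rfl
    rw [hs]
    have hfold : (pvSort slots1).foldl (fun (acc : Option Int) a => List.foldl (pvStep duration a) acc []) none = none := by
      simp
    rw [hfold, pvSweep_nil_right]
  unfold Spec_entrance entrance entrance_alt
  show pvSweep duration (pvSort slots1) (pvSort slots2)
      = (match (pvSort slots1).foldl (fun acc a => (pvSort slots2).foldl (pvStep duration a) acc) none with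
        | none => []
        | some s => [s, s + duration])
  rw [pvBest_eq_min]
  exact pvSweep_eq_min duration (pvSort slots1) (pvSort slots2)
    (pvSort_pairwise_at slots1 (hpre.1 h2)) (pvSort_pairwise_at slots2 (hpre.2 h1))
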